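-- pv_equiv track=rewrite | github.com/ptitpoulpe/aoc-2024 | code/07.py | part2
-- ===== SOURCE A (Python) =====
-- import operator as op
--
-- class Equation:
--     def __init__(self, result, values, ops):
--         self.result = result
--         self.values = values
--         self.ops = ops
--
--     def test(self, current, index):
--         if  index == len(self.values):
--             return current == self.result
--         if current > self.result:
--             return False
--         for operator in self.ops:
--             if self.test(
--                     operator(current, self.values[index]),
--                     index+1,
--             ):
--                 return True
--         return False
--
-- def part2(equations):
--     sum_results = 0
--     def concat(a, b):
--         return int(str(a) +str(b))
--     for result, values in equations:
--         if Equation(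
--                 result, values, [concat, op.mul, op.add]
--         ).test(values[0], 1):
--             sum_results += result
--     return sum_results
-- ===== SOURCE B (Python) =====
-- def part2(equations):
--     total = 0
--     for result, values in equations:
--         reachable = [values[0]]
--         for v in values[1:]:
--             nxt = []
--             for c in reachable:
--                 if c <= result:
--                     nxt.append(int(str(c) + str(v)))
--                     nxt.append(c * v)
--                     nxt.append(c + v)
--             reachable = nxt
--         if result in reachable:
--             total += result
--     return total
-- ===== Notes on version B (the rewrite author's own statement) =====
-- stated objective: alternative
-- what changed: Replaces A's depth-first short-circuiting recursion over an operator list with an iterative breadth-first layer propagation: a list of all reachable intermediate values is rebuilt value by value (pruned at c <= result) and the target is checked by membership in the final layer.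
-- outside the precondition, e.g. on part2([(0, [5, -1])]): A returns 0, B returns 0
import Mathlib
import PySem

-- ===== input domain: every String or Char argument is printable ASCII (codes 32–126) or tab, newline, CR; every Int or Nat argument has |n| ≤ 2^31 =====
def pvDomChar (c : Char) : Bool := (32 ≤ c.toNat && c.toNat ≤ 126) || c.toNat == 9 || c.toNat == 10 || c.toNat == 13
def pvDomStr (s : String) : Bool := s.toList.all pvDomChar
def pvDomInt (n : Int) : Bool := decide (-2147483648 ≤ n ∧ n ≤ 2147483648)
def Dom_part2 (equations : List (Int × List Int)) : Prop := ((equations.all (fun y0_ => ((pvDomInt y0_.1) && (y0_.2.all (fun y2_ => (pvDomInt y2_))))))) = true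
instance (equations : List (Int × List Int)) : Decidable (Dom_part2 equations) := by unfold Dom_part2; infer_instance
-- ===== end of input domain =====

-- B replaces A's short-circuiting DFS over the three operators by an iterative layer-by-layer
-- propagation of all reachable values (objective: alternative structure, similar cost).

-- ===== PORT A =====
-- concat(a, b) = int(str(a) + str(b)); exact where str(b) has no '-', i.e. 0 ≤ b (guaranteed by Pre_);
-- the .getD 0 totalizes the ValueError case, which Pre_ excludes.
def pyConcat (a b : Int) : Int :=
  (PySem.Int.ofChars? (PySem.Int.toChars a ++ PySem.Int.toChars b)).getD 0

-- Equation.test: recursion with index; the `index < values.length` guard only totalizes the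
-- recursion (Python's index never exceeds len(values) when started at 1 on a nonempty list).
def testA (result : Int) (values : List Int) (current : Int) (index : Nat) : Bool :=
  if index = values.length then current == result
  else if result < current then false
  else if h : index < values.length then
    [pyConcat, (fun a b => a * b), (fun a b => a + b)].any
      (fun op => testA result values (op current values[index]) (index + 1))
  else false
termination_by values.length - index
decreasing_by omega

-- values[0] via pyGet?; .getD 0 totalizes the empty-list IndexError, which Pre_ excludes.
def part2 (equations : List (Int × List Int)) : Int :=
  equations.foldl (fun sum_results eq =>
    if testA eq.1 eq.2 ((PySem.List.pyGet? eq.2 0).getD 0) 1 then sum_results + eq.1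
    else sum_results) 0

-- ===== PORT B =====
-- one layer: expand every pruned (c ≤ result) value by the three operators
def stepB (result v : Int) (reachable : List Int) : List Int :=
  reachable.foldl (fun nxt c =>
    if c ≤ result then ((nxt ++ [pyConcat c v]) ++ [c * v]) ++ [c + v] else nxt) []

def reachB (result : Int) (vs : List Int) (init : List Int) : List Int :=
  vs.foldl (fun r v => stepB result v r) init

def part2_alt (equations : List (Int × List Int)) : Int :=
  equations.foldl (fun total eq =>
    let reachable :=
      reachB eq.1 (PySem.List.slice eq.2 (some 1) none) [(PySem.List.pyGet? eq.2 0).getD 0]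
    if eq.1 ∈ reachable then total + eq.1 else total) 0

-- ===== PRECONDITION & SPEC =====
-- Pre_ excludes equations whose value list is empty (A raises IndexError at values[0]) and those
-- with a negative value after the first, on which A's concat int(str(a)+str(b)) usually raises
-- ValueError; on the few such inputs where pruning avoids the raise A's return is excluded too.
def Pre_part2 (equations : List (Int × List Int)) : Prop :=
  ∀ p ∈ equations, p.2 ≠ [] ∧ ∀ v ∈ p.2.tail, 0 ≤ v
instance (equations : List (Int × List Int)) : Decidable (Pre_part2 equations) := by
  unfold Pre_part2; infer_instance

def pvWitness_part2 : (List (Int × List Int)) := [(190, [10, 19]), (3267, [81, 40, 27])]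

def Spec_part2 (equations : List (Int × List Int)) (out : Int) : Prop := out = part2_alt equations
instance (equations : List (Int × List Int)) (out : Int) : Decidable (Spec_part2 equations out) := by unfold Spec_part2; infer_instance

-- ===== CLAIM (what is proved, stated in full; the proofs are below) =====
def Claim_equal_part2 : Prop := ∀ (equations : List (Int × List Int)), Dom_part2 equations → Pre_part2 equations → Spec_part2 equations (part2 equations)

-- ===== LEMMAS AND PROOFS =====

lemma stepB_nil (result v : Int) : stepB result v [] = [] := rfl

lemma stepB_go (result v : Int) (xs : List Int) : ∀ acc : List Int,
    xs.foldl (fun nxt c =>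
      if c ≤ result then ((nxt ++ [pyConcat c v]) ++ [c * v]) ++ [c + v] else nxt) acc
    = acc ++ xs.foldl (fun nxt c =>
      if c ≤ result then ((nxt ++ [pyConcat c v]) ++ [c * v]) ++ [c + v] else nxt) [] := by
  induction xs with
  | nil => simp
  | cons x t ih =>
    intro acc
    simp only [List.foldl_cons]
    rw [ih, ih (_root_.ite _ _ _)]
    split <;> simp

lemma stepB_append (result v : Int) (xs ys : List Int) :
    stepB result v (xs ++ ys) = stepB result v xs ++ stepB result v ys := by
  unfold stepB
  rw [List.foldl_append, stepB_go]

lemma stepB_single (result v c : Int) :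
    stepB result v [c] = if c ≤ result then [pyConcat c v, c * v, c + v] else [] := by
  unfold stepB; split <;> simp_all

lemma reachB_nil (result : Int) (vs : List Int) : reachB result vs [] = [] := by
  induction vs with
  | nil => rfl
  | cons v t ih => simp [reachB, stepB_nil] at ih ⊢; exact ih

lemma reachB_append (result : Int) (vs : List Int) (xs ys : List Int) :
    reachB result vs (xs ++ ys) = reachB result vs xs ++ reachB result vs ys := by
  induction vs generalizing xs ys with
  | nil => rfl
  | cons v t ih => simp only [reachB, List.foldl_cons] at ih ⊢; rw [stepB_append]; exact ih _ _

lemma testA_eq (result : Int) (values : List Int) :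
    ∀ (k index : Nat) (c : Int), values.length - index = k → index ≤ values.length →
    testA result values c index = decide (result ∈ reachB result (values.drop index) [c]) := by
  intro k
  induction k with
  | zero =>
    intro index c hk hle
    have hidx : index = values.length := by omega
    subst hidx
    rw [testA]
    simp only [if_true, List.drop_length, reachB, List.foldl_nil, List.mem_singleton]
    exact Bool.eq_iff_iff.mpr (by rw [beq_iff_eq, decide_eq_true_eq]; exact eq_comm)
  | succ k ih =>
    intro index c hk hle
    have hlt : index < values.length := by omega
    rw [testA]
    simp only [List.drop_eq_getElem_cons hlt, reachB, List.foldl_cons]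
    by_cases hc : result < c
    · rw [if_neg (by omega), if_pos hc]
      have hnil : stepB result values[index] [c] = [] := by
        rw [stepB_single, if_neg (by omega : ¬ c ≤ result)]
      have hrn : reachB result (values.drop (index + 1)) [] = [] := reachB_nil _ _
      simp only [reachB] at hrn
      simp [hnil, hrn]
    · rw [if_neg (by omega), if_neg hc, dif_pos hlt]
      have hstep : stepB result values[index] [c]
          = [pyConcat c values[index]] ++ ([c * values[index]] ++ [c + values[index]]) := by
        rw [stepB_single, if_pos (by omega : c ≤ result)]; simp
      have hra := reachB_append result (values.drop (index + 1))
      simp only [reachB] at hra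
      simp only [hstep, hra]
      simp only [List.any_cons, List.any_nil]
      rw [ih (index + 1) (pyConcat c values[index]) (by omega) (by omega),
          ih (index + 1) (c * values[index]) (by omega) (by omega),
          ih (index + 1) (c + values[index]) (by omega) (by omega)]
      simp only [reachB]
      simp [List.mem_append]
      tauto

lemma contrib_eq (r : Int) (vs : List Int) (s : Int) (hvs : vs ≠ []) :
    (if testA r vs ((PySem.List.pyGet? vs 0).getD 0) 1 then s + r else s) =
    (if r ∈ reachB r (PySem.List.slice vs (some 1) none) [(PySem.List.pyGet? vs 0).getD 0]
     then s + r else s) := by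
  cases vs with
  | nil => exact absurd rfl hvs
  | cons x t =>
    rw [PySem.List.pyGet?_zero_cons, PySem.List.slice_from_one]
    simp only [Option.getD_some, List.tail_cons]
    have := testA_eq r (x :: t) t.length 1 x (by simp) (by simp)
    simp only [List.drop_succ_cons, List.drop_zero] at this
    simp only [this, decide_eq_true_eq]
    split_ifs <;> rfl

lemma foldl_eq (equations : List (Int × List Int)) (s : Int)
    (h : ∀ p ∈ equations, p.2 ≠ [] ∧ ∀ v ∈ p.2.tail, 0 ≤ v) :
    equations.foldl (fun sum_results eq =>
      if testA eq.1 eq.2 ((PySem.List.pyGet? eq.2 0).getD 0) 1 then sum_results + eq.1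
      else sum_results) s =
    equations.foldl (fun total eq =>
      let reachable :=
        reachB eq.1 (PySem.List.slice eq.2 (some 1) none) [(PySem.List.pyGet? eq.2 0).getD 0]
      if eq.1 ∈ reachable then total + eq.1 else total) s := by
  induction equations generalizing s with
  | nil => rfl
  | cons p t ih =>
    simp only [List.foldl_cons]
    rw [contrib_eq p.1 p.2 s (h p (by simp)).1]
    exact ih _ (fun q hq => h q (by simp [hq]))

-- ===== VERDICT (by name: the statement is the Claim_ definition above) =====
theorem part2_spec : Claim_equal_part2 := by
  intro equations _ hpre
  unfold Spec_part2 part2 part2_alt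
  exact foldl_eq equations 0 hpre
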